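-- pv_equiv track=rewrite | github.com/chanwutk/polytris | legacy/pipeline-stages/misstrack-benchmark.py | construct_track
-- ===== SOURCE A (Python) =====
-- BBoxType = tuple[int, int, int, int, int]
--
-- def construct_track(render: list[tuple[int, list[BBoxType]]]):
--     tracks: dict[int, list[BBoxType]] = {}
--     for fid, dets in render:
--         for oid, *box in dets:
--             if oid not in tracks:
--                 tracks[oid] = []
--             tracks[oid].append((fid, box[0], box[1], box[2], box[3]))
--     return tracks
-- ===== SOURCE B (Python) =====
-- def construct_track(render: list) -> dict:
--     # Two-pass gather: flatten to (oid, record) pairs, then build each track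
--     # by filtering the flat list per distinct oid (first-appearance order).
--     records = [(oid, (fid, box[0], box[1], box[2], box[3]))
--                for fid, dets in render
--                for oid, *box in dets]
--     return {oid: [rec for o, rec in records if o == oid]
--             for oid in dict.fromkeys(o for o, _ in records)}
-- ===== Notes on version B (the rewrite author's own statement) =====
-- stated objective: alternative
-- what changed: Replaces A's single-pass dict accumulation (insert-if-missing then append per detection) with a two-pass gather: flatten render into (oid, record) pairs, dedup the oids in first-appearance order, then build each track by filtering the flat list per oid.
import Mathlib
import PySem

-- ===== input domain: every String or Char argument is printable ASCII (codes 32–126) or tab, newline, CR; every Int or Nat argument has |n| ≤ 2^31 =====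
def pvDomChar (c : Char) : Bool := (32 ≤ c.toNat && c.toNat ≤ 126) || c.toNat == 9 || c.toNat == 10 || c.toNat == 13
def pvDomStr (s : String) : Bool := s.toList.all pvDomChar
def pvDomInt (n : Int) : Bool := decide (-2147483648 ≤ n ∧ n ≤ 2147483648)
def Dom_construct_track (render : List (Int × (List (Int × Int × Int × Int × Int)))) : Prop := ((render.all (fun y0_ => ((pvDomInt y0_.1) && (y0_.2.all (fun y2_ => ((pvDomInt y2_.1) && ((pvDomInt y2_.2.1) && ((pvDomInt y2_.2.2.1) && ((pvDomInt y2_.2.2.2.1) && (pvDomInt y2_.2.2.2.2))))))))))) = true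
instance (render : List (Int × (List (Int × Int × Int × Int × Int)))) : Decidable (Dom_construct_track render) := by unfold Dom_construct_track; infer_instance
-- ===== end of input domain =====

-- B replaces A's single-pass dict accumulation by a flatten / dedup-keys / per-key gather
-- decomposition (alternative structure, same result including key order).

-- ===== PORT A =====
-- Python A: one pass over render; for each detection, ensure the oid key exists, then append.
def construct_track (render : List (Int × (List (Int × Int × Int × Int × Int)))) : List (Int × List (Int × Int × Int × Int × Int)) :=
  (render.foldl (fun tracks fd =>
      fd.2.foldl (fun tracks det =>
          let tracks := if tracks.contains det.1 then tracks else tracks.insert det.1 []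
          tracks.modify det.1 [] (fun l => l ++ [(fd.1, det.2.1, det.2.2.1, det.2.2.2.1, det.2.2.2.2)]))
        tracks)
    PySem.Dict.empty).items

-- ===== PORT B =====
def construct_track_alt (render : List (Int × (List (Int × Int × Int × Int × Int)))) : List (Int × List (Int × Int × Int × Int × Int)) :=
  let records := render.flatMap (fun fd =>
    fd.2.map (fun det => (det.1, (fd.1, det.2.1, det.2.2.1, det.2.2.2.1, det.2.2.2.2))))
  (PySem.List.dedup (records.map (fun r => r.1))).map
    (fun oid => (oid, (records.filter (fun r => r.1 == oid)).map (fun r => r.2)))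

-- ===== PRECONDITION & SPEC =====
def Spec_construct_track (render : List (Int × (List (Int × Int × Int × Int × Int)))) (out : List (Int × List (Int × Int × Int × Int × Int))) : Prop := out = construct_track_alt render
instance (render : List (Int × (List (Int × Int × Int × Int × Int)))) (out : List (Int × List (Int × Int × Int × Int × Int))) : Decidable (Spec_construct_track render out) := by unfold Spec_construct_track; exact @instDecidableEqList _ instDecidableEqProd _ _

-- ===== CLAIM (what is proved, stated in full; the proofs are below) =====
def Claim_equal_construct_track : Prop := ∀ (render : List (Int × (List (Int × Int × Int × Int × Int)))), Dom_construct_track render → Spec_construct_track render (construct_track render)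

-- ===== LEMMAS AND PROOFS =====

-- A's guarded "insert [] if missing, then append" step is the plain modify-with-default step.
theorem pv_guard_step {V : Type} (d : PySem.Dict Int V) (k : Int) (f : V → V) (d0 : V) :
    (if d.contains k then d else d.insert k d0).modify k d0 f = d.modify k d0 f := by
  by_cases h : d.contains k = true
  · simp [h]
  · simp only [h]
    simp [PySem.Dict.modify, PySem.Dict.getD_insert_self, PySem.Dict.insert_insert_self,
      PySem.Dict.getD_of_not_contains (d := d) (k := k) (h := by simpa using h) (d0 := d0)]

theorem construct_track_spec : Claim_equal_construct_track := by
  intro render _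
  unfold Spec_construct_track construct_track construct_track_alt
  -- Replace A's guarded step by the plain modify step, then fold over the flattened records.
  have hstep : ∀ (tracks : PySem.Dict Int (List (Int × Int × Int × Int × Int)))
      (fd : Int × List (Int × Int × Int × Int × Int)),
      fd.2.foldl (fun tracks det =>
          let tracks := if tracks.contains det.1 then tracks else tracks.insert det.1 []
          tracks.modify det.1 [] (fun l => l ++ [(fd.1, det.2.1, det.2.2.1, det.2.2.2.1, det.2.2.2.2)]))
        tracks
      = (fd.2.map (fun det => (det.1, (fd.1, det.2.1, det.2.2.1, det.2.2.2.1, det.2.2.2.2)))).foldl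
          (fun tracks p => tracks.modify p.1 [] (fun l => l ++ [p.2])) tracks := by
    intro tracks fd
    rw [List.foldl_map]
    exact PySem.List.foldl_congr_mem _ _ _ _ (fun d det _ => pv_guard_step d det.1 _ [])
  simp only [hstep]
  rw [← List.foldl_flatMap]
  set records := render.flatMap (fun fd =>
    fd.2.map (fun det => (det.1, (fd.1, det.2.1, det.2.2.1, det.2.2.2.1, det.2.2.2.2)))) with hrec
  have hnd : (records.foldl
      (fun tracks p => tracks.modify p.1 [] (fun l => l ++ [p.2])) PySem.Dict.empty).keys.Nodup :=
    PySem.Dict.nodup_keys_foldl_modify_key records Prod.fst [] (fun _ p => fun l => l ++ [p.2])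
      PySem.Dict.empty (by simp)
  rw [PySem.Dict.items_eq_map_keys _ hnd []]
  rw [PySem.Dict.keys_foldl_modify_key]
  simp only [PySem.Dict.keys_empty, PySem.Set.update_nil_left, PySem.List.dedup_eq_ofList]
  refine List.map_congr_left (fun k _ => ?_)
  rw [PySem.Dict.getD_foldl_modify_append]
  simp
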